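-- pv_equiv track=rewrite | github.com/prouch4/Practices | CodeSignal/str_arr3.py | solution
-- ===== SOURCE A (Python) =====
-- def solution(arr, text):
--     # TODO: implement
--     new_string = ''
--     sum_num = 0
--     i = 0
--
--     while i < len(text) and sum_num <= 30 and i < len(arr):
--         sum_num += abs(arr[i] - 3)
--         if sum_num > 30:
--             break
--         if text[i] == 'z':
--             new_string += 'a'
--         elif text[i] == 'Z':
--             new_string += 'A'
--         elif text[i] == ' ':
--             new_string += ' '
--         else:
--             new_string += chr(ord(text[i]) + 1)
--         i += 1
--
--     return new_string, arr[i:]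
-- ===== SOURCE B (Python) =====
-- def solution(arr, text):
--     # Pass 1: locate the cutoff index by scanning the weights only.
--     n = min(len(arr), len(text))
--     cutoff = n
--     s = 0
--     for j in range(n):
--         s += abs(arr[j] - 3)
--         if s > 30:
--             cutoff = j
--             break
--     # Pass 2: transform the prefix of text before the cutoff.
--     out = ''.join('a' if c == 'z' else 'A' if c == 'Z' else ' ' if c == ' '
--                   else chr(ord(c) + 1) for c in text[:cutoff])
--     return out, arr[cutoff:]
-- ===== Notes on version B (the rewrite author's own statement) =====
-- stated objective: alternative
-- what changed: Replaces A's single interleaved early-terminating while-loop (accumulating the string and the weight sum together) with a two-pass decomposition: first locate the cutoff index by scanning only the weights, then build the output by mapping a transform over text[:cutoff] and slicing arr[cutoff:].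
import Mathlib
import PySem

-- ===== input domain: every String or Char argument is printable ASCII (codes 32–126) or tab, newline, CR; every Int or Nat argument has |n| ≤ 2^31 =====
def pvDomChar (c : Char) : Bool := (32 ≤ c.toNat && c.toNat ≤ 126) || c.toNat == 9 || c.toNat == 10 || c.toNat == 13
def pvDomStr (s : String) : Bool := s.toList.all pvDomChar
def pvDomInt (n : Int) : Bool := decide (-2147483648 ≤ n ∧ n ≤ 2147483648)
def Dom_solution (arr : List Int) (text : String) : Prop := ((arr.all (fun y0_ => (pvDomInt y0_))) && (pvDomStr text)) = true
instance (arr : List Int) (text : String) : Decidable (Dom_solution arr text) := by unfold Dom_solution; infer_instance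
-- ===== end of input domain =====

-- B replaces A's single interleaved early-terminating loop with a two-pass
-- locate-cutoff-then-transform decomposition (alternative, same cost class).

-- ===== PORT A =====
-- shared char transform: z→a, Z→A, space→space, else chr(ord+1)
def pvTrans (c : Char) : Char :=
  if c = 'z' then 'a'
  else if c = 'Z' then 'A'
  else if c = ' ' then ' '
  else Char.ofNat (c.toNat + 1)

-- A's while loop: walks arr and text together, accumulating new_string and the
-- weight sum, breaking as soon as the sum exceeds 30; returns (acc, remaining arr).
def pvLoopA : List Int → List Char → Int → List Char → (List Char × List Int)
  | a :: as, c :: cs, sumNum, acc =>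
      if sumNum ≤ 30 then
        let s := sumNum + |a - 3|
        if s > 30 then (acc, a :: as)
        else pvLoopA as cs s (acc ++ [pvTrans c])
      else (acc, a :: as)
  | arr, _, _, acc => (acc, arr)

def solution (arr : List Int) (text : String) : String × List Int :=
  let (cs, rest) := pvLoopA arr text.toList 0 []
  (String.mk cs, rest)

-- ===== PORT B =====
-- B's pass 1: first index whose running weight sum exceeds 30 (else min length).
def pvCutoff : List Int → List Char → Int → Nat
  | a :: as, _ :: cs, s =>
      let s' := s + |a - 3|
      if s' > 30 then 0 else pvCutoff as cs s' + 1
  | _, _, _ => 0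

def solution_alt (arr : List Int) (text : String) : String × List Int :=
  let k := pvCutoff arr text.toList 0
  (String.mk (((text.toList).take k).map pvTrans), arr.drop k)

-- ===== PRECONDITION & SPEC =====
def Spec_solution (arr : List Int) (text : String) (out : String × List Int) : Prop := out = solution_alt arr text
instance (arr : List Int) (text : String) (out : String × List Int) : Decidable (Spec_solution arr text out) := by unfold Spec_solution; infer_instance

-- ===== CLAIM (what is proved, stated in full; the proofs are below) =====
def Claim_equal_solution : Prop := ∀ (arr : List Int) (text : String), Dom_solution arr text → Spec_solution arr text (solution arr text)

-- ===== LEMMAS AND PROOFS =====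
theorem pvLoopA_eq (arr : List Int) :
    ∀ (cs : List Char) (s : Int) (acc : List Char), s ≤ 30 →
      pvLoopA arr cs s acc =
        (acc ++ (cs.take (pvCutoff arr cs s)).map pvTrans, arr.drop (pvCutoff arr cs s)) := by
  induction arr with
  | nil => intro cs s acc _; cases cs <;> simp [pvLoopA, pvCutoff]
  | cons a as ih =>
      intro cs s acc hs
      cases cs with
      | nil => simp [pvLoopA, pvCutoff]
      | cons c cs' =>
          simp only [pvLoopA, pvCutoff, if_pos hs]
          by_cases h : s + |a - 3| > 30
          · simp [h]
          · simp only [if_neg h]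
            rw [ih cs' (s + |a - 3|) (acc ++ [pvTrans c]) (by omega)]
            simp

-- ===== VERDICT (by name: the statement is the Claim_ definition above) =====
theorem solution_spec : Claim_equal_solution := by
  intro arr text _
  show _ = _
  simp [solution, solution_alt, pvLoopA_eq arr text.toList 0 [] (by norm_num)]
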